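-- pv_equiv track=rewrite | github.com/prittt/marchesini-python-5 | Soluzioni/Stringhe/rimuovi_singoli_spazi.py | rimuovi_singoli_spazi_v01
-- ===== SOURCE A (Python) =====
-- def rimuovi_singoli_spazi_v01(s: str) -> str:
--     result = ""
--     i = 0
--     while i < len(s):
--         if s[i] == ' ':
--             start = i
--             while i < len(s) and s[i] == ' ':
--                 i += 1
--             if i - start > 1:
--                 result += s[start:i] # result += " "* (i - start)
--         else:
--             result += s[i]
--             i += 1
--     return result
-- ===== SOURCE B (Python) =====
-- def rimuovi_singoli_spazi_v01(s: str) -> str: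
--     # Split s into maximal runs of identical characters, then keep every
--     # run except a lone single space, and join the kept runs.
--     runs = []
--     for ch in s:
--         if runs and runs[-1][-1] == ch:
--             runs[-1] = runs[-1] + ch
--         else:
--             runs.append(ch)
--     return ''.join(r for r in runs if r != ' ')
-- ===== Notes on version B (the rewrite author's own statement) =====
-- stated objective: alternative
-- what changed: B replaces A's index-walking scan with an inner space-counting while-loop by a run-length decomposition: one fold builds the list of maximal runs of identical characters, then a filter-join drops exactly the lone single-space runs.
import Mathlib
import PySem

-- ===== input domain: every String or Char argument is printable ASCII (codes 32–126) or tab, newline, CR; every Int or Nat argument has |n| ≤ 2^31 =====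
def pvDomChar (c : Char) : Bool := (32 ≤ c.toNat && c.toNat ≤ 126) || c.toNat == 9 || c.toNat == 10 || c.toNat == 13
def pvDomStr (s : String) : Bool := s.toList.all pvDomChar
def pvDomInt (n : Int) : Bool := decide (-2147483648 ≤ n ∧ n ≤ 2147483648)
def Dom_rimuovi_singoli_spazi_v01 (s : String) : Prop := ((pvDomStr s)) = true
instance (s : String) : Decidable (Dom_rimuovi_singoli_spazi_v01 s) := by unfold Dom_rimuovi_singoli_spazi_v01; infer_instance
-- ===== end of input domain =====

-- B re-implements A's index scan as a run-length decomposition (fold building maximal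
-- runs, then filter-join dropping lone single spaces); alternative decomposition, same cost.

-- ===== PORT A =====
-- inner `while i < len(s) and s[i] == ' ': i += 1` of A: returns the final i
def pvAInner (l : List Char) (i : Nat) : Nat :=
  if h : i < l.length then
    if l[i] = ' ' then pvAInner l (i + 1) else i
  else i
termination_by l.length - i

theorem pvAInner_ge (l : List Char) (i : Nat) : i ≤ pvAInner l i := by
  unfold pvAInner
  split
  · split
    · exact le_trans (Nat.le_succ i) (pvAInner_ge l (i + 1))
    · exact le_refl i
  · exact le_refl i
termination_by l.length - i

-- used by pvALoop's termination
theorem pvAInner_gt (l : List Char) (i : Nat) (h : i < l.length) (hs : l[i] = ' ') :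
    i < pvAInner l i := by
  unfold pvAInner
  simp [h, hs]
  exact lt_of_lt_of_le (Nat.lt_succ_self i) (pvAInner_ge l (i + 1))

-- outer while of A; state (result, i)
def pvALoop (l : List Char) (result : List Char) (i : Nat) : List Char :=
  if h : i < l.length then
    if hs : l[i] = ' ' then
      let start := i
      let j := pvAInner l i
      let result' := if j - start > 1 then result ++ PySem.List.slice l (some (start : Int)) (some (j : Int)) else result
      pvALoop l result' j
    else pvALoop l (result ++ [l[i]]) (i + 1)
  else result
termination_by l.length - i
decreasing_by
  · have := pvAInner_gt l i h hs; omega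
  · omega

def rimuovi_singoli_spazi_v01 (s : String) : String :=
  String.ofList (pvALoop s.toList [] 0)

-- ===== PORT B =====
-- one step of B's for-loop: extend the last run if it ends in ch, else start a new run
def pvBStep (runs : List (List Char)) (ch : Char) : List (List Char) :=
  match runs.getLast? with
  | some r => if r.getLast? = some ch then runs.dropLast ++ [r ++ [ch]] else runs ++ [[ch]]
  | none => runs ++ [[ch]]

def rimuovi_singoli_spazi_v01_alt (s : String) : String :=
  String.ofList (((s.toList.foldl pvBStep []).filter (fun r => r ≠ [' '])).flatten)

-- ===== PRECONDITION & SPEC =====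
def Spec_rimuovi_singoli_spazi_v01 (s : String) (out : String) : Prop := out = rimuovi_singoli_spazi_v01_alt s
instance (s : String) (out : String) : Decidable (Spec_rimuovi_singoli_spazi_v01 s out) := by unfold Spec_rimuovi_singoli_spazi_v01; infer_instance

-- ===== CLAIM (what is proved, stated in full; the proofs are below) =====
def Claim_equal_rimuovi_singoli_spazi_v01 : Prop := ∀ (s : String), Dom_rimuovi_singoli_spazi_v01 s → Spec_rimuovi_singoli_spazi_v01 s (rimuovi_singoli_spazi_v01 s)

-- ===== LEMMAS AND PROOFS =====

-- reference run decomposition: maximal runs of identical characters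
def pvRuns (l : List Char) : List (List Char) :=
  match l with
  | [] => []
  | c :: rest => (c :: rest.takeWhile (· = c)) :: pvRuns (rest.dropWhile (· = c))
termination_by l.length
decreasing_by
  simp only [List.length_cons]
  exact Nat.lt_succ_of_le (List.length_dropWhile_le _ _)

-- filter-flatten of a run list
def pvFF (rs : List (List Char)) : List Char :=
  (rs.filter (fun r => r ≠ [' '])).flatten

theorem pvRuns_nil : pvRuns [] = [] := by unfold pvRuns; rfl

theorem pvRuns_cons (c : Char) (rest : List Char) :
    pvRuns (c :: rest) = (c :: rest.takeWhile (· = c)) :: pvRuns (rest.dropWhile (· = c)) := by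
  conv_lhs => unfold pvRuns

-- ---- B side: the fold computes pvRuns ----

-- continuation view of the fold once a nonempty last run r is present
def pvGlue (r : List Char) (l : List Char) : List (List Char) :=
  match l with
  | [] => [r]
  | c :: rest => if r.getLast? = some c then pvGlue (r ++ [c]) rest else r :: pvGlue [c] rest

theorem foldl_pvBStep_glue (l : List Char) (rs : List (List Char)) (r : List Char) (hr : r ≠ []) :
    l.foldl pvBStep (rs ++ [r]) = rs ++ pvGlue r l := by
  induction l generalizing rs r with
  | nil => simp [pvGlue]
  | cons c rest ih =>
    simp only [List.foldl_cons, pvGlue]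
    have hlast : (rs ++ [r]).getLast? = some r := by
      simp [List.getLast?_append]
    by_cases hc : r.getLast? = some c
    · have hstep : pvBStep (rs ++ [r]) c = rs ++ [r ++ [c]] := by
        simp [pvBStep, hlast, hc]
      rw [hstep, hc, if_pos rfl, ih rs (r ++ [c]) (by simp)]
    · have hstep : pvBStep (rs ++ [r]) c = (rs ++ [r]) ++ [[c]] := by
        simp [pvBStep, hlast, hc]
      rw [hstep, if_neg hc]
      simpa using ih (rs ++ [r]) [c] (by simp)

theorem pvGlue_all_eq (l : List Char) (r : List Char) (c : Char)
    (hr : r ≠ []) (hall : ∀ x ∈ r, x = c) :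
    pvGlue r l = (r ++ l.takeWhile (· = c)) :: pvRuns (l.dropWhile (· = c)) := by
  induction l generalizing r c with
  | nil => simp [pvGlue, pvRuns_nil]
  | cons d rest ih =>
    have hlast : r.getLast? = some c := by
      rw [List.getLast?_eq_some_getLast hr, hall _ (List.getLast_mem hr)]
    rw [pvGlue]
    by_cases hdc : d = c
    · subst hdc
      rw [if_pos hlast]
      rw [ih (r ++ [d]) d (by simp) (by intro x hx; rcases List.mem_append.mp hx with h | h
                                        · exact hall x h
                                        · simpa using h)]
      simp
    · have hne : ¬ r.getLast? = some d := by
        rw [hlast]; intro h; exact hdc (Option.some.inj h).symm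
      rw [if_neg hne]
      have key : pvGlue [d] rest = pvRuns (d :: rest) := by
        rw [ih [d] d (by simp) (by simp), pvRuns_cons]
        simp
      rw [key]
      have htw : (d :: rest).takeWhile (· = c) = [] := by
        simp [hdc]
      have hdw : (d :: rest).dropWhile (· = c) = d :: rest := by
        simp [hdc]
      rw [htw, hdw, List.append_nil]

theorem foldl_pvBStep_runs (l : List Char) : l.foldl pvBStep [] = pvRuns l := by
  cases l with
  | nil => simp [pvRuns_nil]
  | cons c rest =>
    rw [List.foldl_cons]
    have hstep : pvBStep [] c = [[c]] := by simp [pvBStep]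
    rw [hstep]
    have h1 : rest.foldl pvBStep ([] ++ [[c]]) = [] ++ pvGlue [c] rest :=
      foldl_pvBStep_glue rest [] [c] (by simp)
    simp only [List.nil_append] at h1
    rw [h1, pvGlue_all_eq rest [c] c (by simp) (by simp), pvRuns_cons]
    rfl

-- ---- A side ----

theorem pvAInner_spec (l : List Char) (i : Nat) :
    pvAInner l i = i + ((l.drop i).takeWhile (· = ' ')).length := by
  unfold pvAInner
  split
  · rename_i h
    have hdrop : l.drop i = l[i] :: l.drop (i + 1) := List.drop_eq_getElem_cons h
    split
    · rename_i hs
      rw [pvAInner_spec l (i + 1), hdrop, hs]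
      simp
      omega
    · rename_i hs
      rw [hdrop]
      simp [hs]
  · rename_i h
    rw [List.drop_eq_nil_of_le (by omega)]
    simp
termination_by l.length - i

theorem pvFF_cons_nonspace (c : Char) (rest : List Char) (hc : c ≠ ' ') :
    pvFF (pvRuns (c :: rest)) = c :: pvFF (pvRuns rest) := by
  rw [pvRuns_cons]
  cases rest with
  | nil =>
    simp [pvFF, pvRuns_nil, hc]
  | cons d rest' =>
    by_cases hdc : d = c
    · subst hdc
      rw [pvRuns_cons]
      have hne1 : (d :: (d :: rest').takeWhile (· = d)) ≠ [' '] := by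
        intro h; exact hc (List.cons.inj h).1
      have hne2 : (d :: rest'.takeWhile (· = d)) ≠ [' '] := by
        intro h; exact hc (List.cons.inj h).1
      simp only [pvFF, List.takeWhile_cons, decide_true, List.dropWhile_cons]
      simp only [List.filter_cons, hne2, decide_not]
      simp
    · have htw : (d :: rest').takeWhile (· = c) = [] := by simp [hdc]
      have hdw : (d :: rest').dropWhile (· = c) = d :: rest' := by simp [hdc]
      rw [htw, hdw]
      have hne : ([c] : List Char) ≠ [' '] := by
        intro h; exact hc (List.cons.inj h).1
      simp [pvFF, hne]

theorem pvALoop_spec (l : List Char) (result : List Char) (i : Nat) :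
    pvALoop l result i = result ++ pvFF (pvRuns (l.drop i)) := by
  unfold pvALoop
  split
  · rename_i h
    have hdrop : l.drop i = l[i] :: l.drop (i + 1) := List.drop_eq_getElem_cons h
    split
    · rename_i hs
      -- space run
      set rest := l.drop (i + 1) with hrest
      set tw := rest.takeWhile (· = ' ') with htw
      have hj : pvAInner l i = i + (1 + tw.length) := by
        rw [pvAInner_spec, hdrop, hs]
        simp [← htw]
        omega
      have hslice : PySem.List.slice l (some (i : Int)) (some ((pvAInner l i : Nat) : Int)) = ' ' :: tw := by
        rw [PySem.List.slice_natCast, hj, hdrop, hs]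
        have : i + (1 + tw.length) - i = 1 + tw.length := by omega
        rw [this]
        have hsplit : rest = tw ++ rest.dropWhile (· = ' ') := (List.takeWhile_append_dropWhile).symm
        rw [hsplit, Nat.add_comm 1 tw.length]
        simp [List.take_succ_cons]
      have hdropj : l.drop (pvAInner l i) = rest.dropWhile (· = ' ') := by
        rw [hj]
        have : l.drop (i + (1 + tw.length)) = (l.drop (i+1)).drop tw.length := by
          rw [List.drop_drop]; congr 1; omega
        rw [this, ← hrest]
        have hsplit : rest = tw ++ rest.dropWhile (· = ' ') := (List.takeWhile_append_dropWhile).symm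
        conv_lhs => rw [hsplit]
        simp
      rw [pvALoop_spec l _ (pvAInner l i), hdropj]
      rw [hdrop, hs, pvRuns_cons, ← htw]
      by_cases hlen : pvAInner l i - i > 1
      · have htwne : tw ≠ [] := by
          intro hnil
          rw [hj] at hlen
          simp [hnil] at hlen
        rw [if_pos hlen, hslice]
        have hne : (' ' :: tw) ≠ [' '] := by
          intro hcon
          have := (List.cons.inj hcon).2
          exact htwne this
        simp [pvFF, hne]
      · have htwnil : tw = [] := by
          have h0 : tw.length = 0 := by rw [hj] at hlen; omega
          exact List.length_eq_zero_iff.mp h0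
        rw [if_neg hlen, htwnil]
        simp [pvFF]
    · rename_i hs
      rw [pvALoop_spec l _ (i + 1), hdrop, pvFF_cons_nonspace _ _ hs]
      simp
  · rename_i h
    rw [List.drop_eq_nil_of_le (by omega)]
    simp [pvRuns_nil, pvFF]
termination_by l.length - i
decreasing_by
  all_goals omega
-- ===== VERDICT (by name: the statement is the Claim_ definition above) =====
theorem rimuovi_singoli_spazi_v01_spec : Claim_equal_rimuovi_singoli_spazi_v01 := by
  intro s _
  unfold Spec_rimuovi_singoli_spazi_v01 rimuovi_singoli_spazi_v01 rimuovi_singoli_spazi_v01_alt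
  rw [pvALoop_spec, foldl_pvBStep_runs]
  simp [pvFF]
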